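-- pv_equiv track=rewrite | github.com/NablaDeltaPsi/StarChecker | StarChecker.py | get_attributes_by_color
-- ===== SOURCE A (Python) =====
-- def get_attributes_by_color(stars, key, ignore_color=False):
--     attdict = {}
--     for star in stars:
--         if star['color'] not in attdict.keys():
--             attdict[star['color']] = []
--         attdict[star['color']].append(star[key])
--     attlist = []
--     for key in sorted(attdict.keys()):
--         if ignore_color:
--             attlist += attdict[key]
--         else:
--             attlist.append(attdict[key])
--     if ignore_color:
--         attlist = [attlist]
--     return attlist
-- ===== SOURCE B (Python) =====
-- def get_attributes_by_color(stars, key, ignore_color=False):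
--     colors = sorted({star['color'] for star in stars})
--     groups = [[star[key] for star in stars if star['color'] == c] for c in colors]
--     if ignore_color:
--         return [[v for g in groups for v in g]]
--     return groups
-- ===== Notes on version B (the rewrite author's own statement) =====
-- stated objective: simpler
-- what changed: A incrementally builds a dict of color -> values and then walks its sorted keys; B instead computes the sorted set of distinct colors and builds each group with one declarative filter pass over the stars, flattening at the end when ignore_color.
import Mathlib
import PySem

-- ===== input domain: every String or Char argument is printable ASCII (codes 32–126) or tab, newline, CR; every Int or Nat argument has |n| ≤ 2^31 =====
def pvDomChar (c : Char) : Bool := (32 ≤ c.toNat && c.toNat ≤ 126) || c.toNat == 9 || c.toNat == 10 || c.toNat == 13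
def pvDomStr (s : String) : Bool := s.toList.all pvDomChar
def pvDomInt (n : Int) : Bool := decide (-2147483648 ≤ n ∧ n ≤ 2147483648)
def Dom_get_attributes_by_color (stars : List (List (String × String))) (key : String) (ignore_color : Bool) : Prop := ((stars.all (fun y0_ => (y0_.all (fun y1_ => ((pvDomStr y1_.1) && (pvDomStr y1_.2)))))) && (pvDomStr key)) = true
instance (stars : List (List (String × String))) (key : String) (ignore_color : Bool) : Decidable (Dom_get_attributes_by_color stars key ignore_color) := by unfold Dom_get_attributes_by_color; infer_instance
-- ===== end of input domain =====

-- B replaces A's incremental dict grouping by "sorted distinct colors, then one filter pass per color"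
-- (objective: simpler/more declarative; no speed claim). Return values proved equal on Pre_.

-- star['color'] / star[k]: a Python dict modelled as an association list (first-match lookup);
-- Option, none = KeyError (excluded by Pre_); both ports read it through .getD "".
def pyStarGet (star : List (String × String)) (k : String) : Option String :=
  PySem.Dict.get? (PySem.Dict.mk star) k

-- ===== PORT A =====
def get_attributes_by_color (stars : List (List (String × String))) (key : String) (ignore_color : Bool) : List (List String) :=
  -- first loop: if color fresh, attdict[color] = []; then attdict[color].append(star[key])
  let attdict : PySem.Dict String (List String) :=
    stars.foldl (fun d star =>
      let c := (pyStarGet star "color").getD ""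
      let d := if d.contains c then d else d.insert c []
      d.modify c [] (fun l => l ++ [(pyStarGet star key).getD ""])) PySem.Dict.empty
  -- second loop: for key in sorted(attdict.keys()): attlist += attdict[key] / attlist.append(attdict[key]);
  -- in the ignore_color branch the Python attlist is a flat list of strings, wrapped [attlist] at the end,
  -- so the two branches (fixed by ignore_color) are transcribed separately to keep one return type
  if ignore_color then
    [(PySem.List.sorted (PySem.Dict.keys attdict) (fun x => x) false).foldl
       (fun acc k => acc ++ attdict.getD k []) []]
  else
    (PySem.List.sorted (PySem.Dict.keys attdict) (fun x => x) false).foldl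
       (fun acc k => acc ++ [attdict.getD k []]) []

-- ===== PORT B =====
def get_attributes_by_color_alt (stars : List (List (String × String))) (key : String) (ignore_color : Bool) : List (List String) :=
  let colors := PySem.List.sorted (PySem.Set.ofList (stars.map (fun s => (pyStarGet s "color").getD ""))) (fun x => x) false
  let groups := colors.map (fun c =>
    (stars.filter (fun s => (pyStarGet s "color").getD "" == c)).map (fun s => (pyStarGet s key).getD ""))
  if ignore_color then [groups.flatten] else groups

-- ===== PRECONDITION & SPEC =====
-- Pre_ excludes exactly the inputs where the Python raises KeyError: some star missing 'color' or the key.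
def Pre_get_attributes_by_color (stars : List (List (String × String))) (key : String) (ignore_color : Bool) : Prop :=
  ∀ star ∈ stars, "color" ∈ star.map Prod.fst ∧ key ∈ star.map Prod.fst
instance (stars : List (List (String × String))) (key : String) (ignore_color : Bool) : Decidable (Pre_get_attributes_by_color stars key ignore_color) := by unfold Pre_get_attributes_by_color; infer_instance

def pvWitness_get_attributes_by_color : (List (List (String × String))) × String × Bool :=
  ([[("color", "red"), ("name", "a")], [("color", "blue"), ("name", "b")]], "name", false)

def Spec_get_attributes_by_color (stars : List (List (String × String))) (key : String) (ignore_color : Bool) (out : List (List String)) : Prop := out = get_attributes_by_color_alt stars key ignore_color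
instance (stars : List (List (String × String))) (key : String) (ignore_color : Bool) (out : List (List String)) : Decidable (Spec_get_attributes_by_color stars key ignore_color out) := by unfold Spec_get_attributes_by_color; infer_instance

-- ===== CLAIM (what is proved, stated in full; the proofs are below) =====
def Claim_equal_get_attributes_by_color : Prop := ∀ (stars : List (List (String × String))) (key : String) (ignore_color : Bool), Dom_get_attributes_by_color stars key ignore_color → Pre_get_attributes_by_color stars key ignore_color → Spec_get_attributes_by_color stars key ignore_color (get_attributes_by_color stars key ignore_color)

-- ===== LEMMAS AND PROOFS =====

-- A's per-star step ("insert [] if fresh, then append") is one modify with default []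
theorem pv_step_eq (d : PySem.Dict String (List String)) (c v : String) :
    (if d.contains c then d else d.insert c []).modify c [] (fun l => l ++ [v])
      = d.modify c [] (fun l => l ++ [v]) := by
  by_cases h : d.contains c
  · simp [h]
  · simp only [Bool.not_eq_true] at h
    simp only [h, Bool.false_eq_true, if_false]
    unfold PySem.Dict.modify
    simp [PySem.Dict.insert_insert_self, PySem.Dict.getD_insert_self,
      PySem.Dict.getD_of_not_contains, h]

-- A's dict after the first loop, as a fold over (color, value) pairs
theorem pv_attdict_eq (stars : List (List (String × String))) (key : String) :
    stars.foldl (fun d star =>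
      let c := (pyStarGet star "color").getD ""
      let d := if d.contains c then d else d.insert c []
      d.modify c [] (fun l => l ++ [(pyStarGet star key).getD ""])) PySem.Dict.empty
    = (stars.map (fun s => ((pyStarGet s "color").getD "", (pyStarGet s key).getD ""))).foldl
        (fun d p => d.modify p.1 [] (fun l => l ++ [p.2])) PySem.Dict.empty := by
  rw [List.foldl_map]
  exact List.foldl_ext _ _ _ (fun d star _ => pv_step_eq d _ _)

-- the per-color group A stores under c equals B's filter pass for c
theorem pv_group_eq (stars : List (List (String × String))) (key : String) (c : String) :
    ((stars.map (fun s => ((pyStarGet s "color").getD "", (pyStarGet s key).getD ""))).filter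
        (fun p => p.1 == c)).map Prod.snd
      = (stars.filter (fun s => (pyStarGet s "color").getD "" == c)).map
          (fun s => (pyStarGet s key).getD "") := by
  rw [List.filter_map, List.map_map]
  rfl

theorem pv_main (stars : List (List (String × String))) (key : String) (ignore_color : Bool) :
    get_attributes_by_color stars key ignore_color = get_attributes_by_color_alt stars key ignore_color := by
  unfold get_attributes_by_color get_attributes_by_color_alt
  rw [pv_attdict_eq]
  have hkeys : ((stars.map (fun s => ((pyStarGet s "color").getD "", (pyStarGet s key).getD ""))).foldl
      (fun d p => d.modify p.1 [] (fun l => l ++ [p.2])) PySem.Dict.empty).keys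
      = PySem.Set.ofList (stars.map (fun s => (pyStarGet s "color").getD "")) := by
    rw [PySem.Dict.keys_foldl_modify_key]
    simp [PySem.Dict.keys_empty, List.map_map, PySem.Set.update]
    rfl
  have hget : ∀ c, ((stars.map (fun s => ((pyStarGet s "color").getD "", (pyStarGet s key).getD ""))).foldl
      (fun d p => d.modify p.1 [] (fun l => l ++ [p.2])) PySem.Dict.empty).getD c []
      = (stars.filter (fun s => (pyStarGet s "color").getD "" == c)).map
          (fun s => (pyStarGet s key).getD "") := by
    intro c
    rw [PySem.Dict.getD_foldl_modify_append, PySem.Dict.getD_empty]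
    simpa using pv_group_eq stars key c
  simp only [hkeys, hget]
  cases ignore_color with
  | false =>
    simp only [Bool.false_eq_true, if_false]
    simpa using PySem.List.foldl_append_singleton_eq_map _ _ []
  | true =>
    simp only [if_true]
    rw [PySem.List.foldl_append_eq_flatMap]
    simp [List.flatMap_def]

-- ===== VERDICT (by name: the statement is the Claim_ definition above) =====
theorem get_attributes_by_color_spec : Claim_equal_get_attributes_by_color := by
  intro stars key ignore_color _ _
  exact pv_main stars key ignore_color
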